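-- pv_equiv track=rewrite | github.com/s-jinipark/pythonTest | COS_Lvl2/St2-1/D1/InitArray05.py | solution
-- ===== SOURCE A (Python) =====
-- def solution(row, col):
--     result = [[0 for _ in range(col)] for _ in range(row)]
--     num = 1
--
--     for r in range(row - 1, -1, -1):
--         for c in range(col):
--                 result[r][c] = num
--                 num+=1
--     return result
-- ===== SOURCE B (Python) =====
-- def solution(row, col):
--     return [[(row - 1 - r) * col + c + 1 for c in range(col)] for r in range(row)]
-- ===== Notes on version B (the rewrite author's own statement) =====
-- stated objective: simpler
-- what changed: Replaced the pre-allocated zero grid, the mutable running counter and the bottom-up in-place fill by a single stateless comprehension computing each cell from the closed form (row-1-r)*col + c + 1.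
import Mathlib
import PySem

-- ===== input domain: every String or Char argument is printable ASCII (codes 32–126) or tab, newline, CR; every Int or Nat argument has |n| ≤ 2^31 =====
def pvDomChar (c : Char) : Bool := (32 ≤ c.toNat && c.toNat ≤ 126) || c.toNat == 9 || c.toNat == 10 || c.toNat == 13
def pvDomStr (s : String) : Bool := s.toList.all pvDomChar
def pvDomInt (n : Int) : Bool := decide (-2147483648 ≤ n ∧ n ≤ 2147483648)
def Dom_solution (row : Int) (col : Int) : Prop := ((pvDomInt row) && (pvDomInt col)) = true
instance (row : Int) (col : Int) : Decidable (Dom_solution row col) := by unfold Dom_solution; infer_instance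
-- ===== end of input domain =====

-- B replaces A's zero grid, mutable counter and bottom-up in-place fill with one
-- stateless comprehension computing each cell by the closed form (row-1-r)*col+c+1 (objective: simpler).

-- ===== PORT A =====
-- result[r][c] = num; num += 1  —  r and c come from ranges, so 0 ≤ r and 0 ≤ c and
-- .toNat-indexed List.set is exact Python list assignment here (indices always in range).
def innerStep (r : Int) (st2 : List (List Int) × Int) (c : Int) : List (List Int) × Int :=
  (st2.1.set r.toNat ((st2.1.getD r.toNat []).set c.toNat st2.2), st2.2 + 1)

-- the body of `for r in …`: runs `for c in range(col)` on the state
def outerStep (col : Int) (st : List (List Int) × Int) (r : Int) : List (List Int) × Int :=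
  (PySem.List.pyRange 0 col 1).foldl (innerStep r) st

def solution (row : Int) (col : Int) : List (List Int) :=
  ((PySem.List.pyRange (row - 1) (-1) (-1)).foldl (outerStep col)
    ((PySem.List.pyRange 0 row 1).map (fun _ => (PySem.List.pyRange 0 col 1).map (fun _ => (0 : Int))), 1)).1

-- ===== PORT B =====
def solution_alt (row : Int) (col : Int) : List (List Int) :=
  (PySem.List.pyRange 0 row 1).map (fun r =>
    (PySem.List.pyRange 0 col 1).map (fun c => (row - 1 - r) * col + c + 1))

-- ===== PRECONDITION & SPEC =====
def Spec_solution (row : Int) (col : Int) (out : List (List Int)) : Prop := out = solution_alt row col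
instance (row : Int) (col : Int) (out : List (List Int)) : Decidable (Spec_solution row col out) := by unfold Spec_solution; infer_instance

-- ===== CLAIM (what is proved, stated in full; the proofs are below) =====
def Claim_equal_solution : Prop := ∀ (row : Int) (col : Int), Dom_solution row col → Spec_solution row col (solution row col)

-- ===== LEMMAS AND PROOFS =====

-- a list equals the range-indexed map of its getD
lemma map_getD_range (l : List (List Int)) :
    (List.range l.length).map (fun r => l.getD r []) = l := by
  apply List.ext_getElem
  · simp
  · intro i h1 h2
    simp [List.getD_eq_getElem?_getD, List.getElem?_eq_getElem h2]

-- the inner loop `for c in range(m)` at a fixed valid row index r writes num, num+1, …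
lemma inner_fold (m : Nat) (g : List (List Int)) (r : Nat) (hr : r < g.length)
    (hlen : m ≤ (g.getD r []).length) (num : Int) :
    (PySem.List.pyRange 0 (m : Int) 1).foldl (innerStep (r : Int)) (g, num)
    = (g.set r ((List.range m).map (fun (k : Nat) => num + (k : Int)) ++ (g.getD r []).drop m), num + m) := by
  induction m with
  | zero =>
    have h0 : PySem.List.pyRange 0 ((0 : Nat) : Int) 1 = [] := by
      simp [PySem.List.pyRange_one_eq_nil]
    rw [h0]
    simp only [List.foldl_nil, List.drop_zero, List.range_zero, Nat.cast_zero,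
      add_zero, Prod.mk.injEq]
    refine ⟨?_, trivial⟩
    rw [List.getD_eq_getElem?_getD, List.getElem?_eq_getElem hr]
    simp
  | succ n ih =>
    have hc : ((n + 1 : Nat) : Int) = (n : Int) + 1 := by push_cast; ring
    rw [hc, PySem.List.pyRange_one_succ_right (by omega : (0 : Int) ≤ (n : Int)), List.foldl_append,
      ih (Nat.le_of_succ_le hlen)]
    simp only [List.foldl_cons, List.foldl_nil, innerStep, Int.toNat_natCast]
    have hgetD : ((g.set r ((List.range n).map (fun (k : Nat) => num + (k : Int)) ++ (g.getD r []).drop n)).getD r [])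
        = (List.range n).map (fun (k : Nat) => num + (k : Int)) ++ (g.getD r []).drop n := by
      simp [List.getD_eq_getElem?_getD, hr]
    rw [hgetD, List.set_set]
    have hsetrow : ((List.range n).map (fun (k : Nat) => num + (k : Int)) ++ (g.getD r []).drop n).set n (num + n)
        = (List.range (n + 1)).map (fun (k : Nat) => num + (k : Int)) ++ (g.getD r []).drop (n + 1) := by
      rw [List.set_append_right _ _ (by simp)]
      obtain ⟨b, bs, hB⟩ := List.exists_cons_of_ne_nil
        (show (g.getD r []).drop n ≠ [] from
          List.ne_nil_of_length_pos (by rw [List.length_drop]; omega))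
      rw [hB]
      have htail : bs = (g.getD r []).drop (n + 1) := by
        rw [← List.tail_drop, hB]
        rfl
      simp [List.range_succ, htail]
    rw [hsetrow]
    simp only [Prod.mk.injEq]
    exact ⟨trivial, by ring⟩

-- the outer countdown loop `for r in range(k-1, -1, -1)` fills rows k-1 … 0 bottom-up
lemma outer_fold (m k : Nat) :
    ∀ (g : List (List Int)) (num : Int), k ≤ g.length →
    (∀ r < k, (g.getD r []).length = m) →
    (PySem.List.pyRange ((k : Int) - 1) (-1) (-1)).foldl (outerStep (m : Int)) (g, num)
    = ((List.range g.length).map (fun r =>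
         if r < k then (List.range m).map (fun (c : Nat) => num + ((k : Int) - 1 - (r : Int)) * (m : Int) + (c : Int))
         else g.getD r []),
       num + (k : Int) * (m : Int)) := by
  induction k with
  | zero =>
    intro g num _ _
    rw [show ((0 : Nat) : Int) - 1 = -1 by norm_num,
      PySem.List.pyRange_neg_one_eq_nil le_rfl, List.foldl_nil]
    have h1 : ∀ r ∈ List.range g.length,
        (if r < 0 then (List.range m).map (fun (c : Nat) => num + (-1 - (r : Int)) * (m : Int) + (c : Int))
         else g.getD r []) = g.getD r [] := by
      intro r _
      exact if_neg (Nat.not_lt_zero r)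
    rw [List.map_congr_left h1, map_getD_range]
    simp
  | succ k ih =>
    intro g num hk hrows
    have hkg : k < g.length := hk
    rw [show ((k + 1 : Nat) : Int) - 1 = (k : Int) by push_cast; ring,
      PySem.List.pyRange_neg_one_cons (by omega : (-1 : Int) < (k : Int)),
      List.foldl_cons]
    have hstep : outerStep (m : Int) (g, num) (k : Int)
        = (g.set k ((List.range m).map (fun (c : Nat) => num + (c : Int))), num + m) := by
      unfold outerStep
      rw [inner_fold m g k hkg (le_of_eq (hrows k k.lt_succ_self).symm) num]
      rw [List.drop_of_length_le (le_of_eq (hrows k k.lt_succ_self))]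
      simp
    rw [hstep]
    have hlen1 : (g.set k ((List.range m).map (fun (c : Nat) => num + (c : Int)))).length = g.length := by simp
    rw [ih (g.set k ((List.range m).map (fun (c : Nat) => num + (c : Int)))) (num + m)
      (by rw [hlen1]; omega)
      (by
        intro r hrk
        rw [List.getD_eq_getElem?_getD, List.getElem?_set_ne (by omega),
          ← List.getD_eq_getElem?_getD]
        exact hrows r (Nat.lt_succ_of_lt hrk))]
    rw [hlen1]
    simp only [Prod.mk.injEq]
    constructor
    · apply List.map_congr_left
      intro r hrmem
      have hrg : r < g.length := List.mem_range.mp hrmem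
      by_cases h1 : r < k
      · rw [if_pos h1, if_pos (Nat.lt_succ_of_lt h1)]
        apply List.map_congr_left
        intro c _
        ring
      · by_cases h2 : r = k
        · subst h2
          rw [if_neg h1, if_pos (Nat.lt_succ_self r)]
          rw [List.getD_eq_getElem?_getD, List.getElem?_set_self hrg]
          simp only [Option.getD_some]
          apply List.map_congr_left
          intro c _
          ring
        · rw [if_neg h1, if_neg (by omega)]
          rw [List.getD_eq_getElem?_getD, List.getElem?_set_ne (by omega),
            ← List.getD_eq_getElem?_getD]
    · push_cast; ring

theorem solution_eq_alt (row col : Int) : solution row col = solution_alt row col := by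
  have hcol : PySem.List.pyRange 0 col 1 = PySem.List.pyRange 0 ((col.toNat : Nat) : Int) 1 := by
    rcases (by omega : 0 ≤ col ∨ col < 0) with h | h
    · rw [Int.toNat_of_nonneg h]
    · rw [PySem.List.pyRange_one_eq_nil h.le, PySem.List.pyRange_one_eq_nil (by omega)]
  have hrowr : PySem.List.pyRange 0 row 1 = PySem.List.pyRange 0 ((row.toNat : Nat) : Int) 1 := by
    rcases (by omega : 0 ≤ row ∨ row < 0) with h | h
    · rw [Int.toNat_of_nonneg h]
    · rw [PySem.List.pyRange_one_eq_nil h.le, PySem.List.pyRange_one_eq_nil (by omega)]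
  have houter : PySem.List.pyRange (row - 1) (-1) (-1)
      = PySem.List.pyRange (((row.toNat : Nat) : Int) - 1) (-1) (-1) := by
    rcases (by omega : 0 ≤ row ∨ row < 0) with h | h
    · rw [Int.toNat_of_nonneg h]
    · rw [PySem.List.pyRange_neg_one_eq_nil (by omega), PySem.List.pyRange_neg_one_eq_nil (by omega)]
  have hos : outerStep col = outerStep ((col.toNat : Nat) : Int) := by
    funext st r
    unfold outerStep
    rw [hcol]
  unfold solution solution_alt
  rw [hos, houter, hcol, hrowr]
  have hg : ((PySem.List.pyRange 0 ((row.toNat : Nat) : Int) 1).map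
      (fun _ => (PySem.List.pyRange 0 ((col.toNat : Nat) : Int) 1).map (fun _ => (0 : Int)))).length
      = row.toNat := by
    simp [PySem.List.length_pyRange_one]
    omega
  rw [outer_fold col.toNat row.toNat _ 1 (le_of_eq hg.symm)
    (by
      intro r hr
      rw [List.getD_eq_getElem?_getD, List.getElem?_map,
        List.getElem?_eq_getElem (by rw [PySem.List.length_pyRange_one]; omega :
          r < (PySem.List.pyRange 0 ((row.toNat : Nat) : Int) 1).length)]
      simp [PySem.List.length_pyRange_one]
      omega)]
  dsimp only
  rw [hg]
  apply List.ext_getElem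
  · simp [PySem.List.length_pyRange_one]
    omega
  · intro i h1 h2
    have hi : i < row.toNat := by
      simpa using h1
    have hrow : row = (row.toNat : Int) := by omega
    rw [List.getElem_map, List.getElem_map, List.getElem_range, if_pos hi,
      PySem.List.getElem_pyRange_one]
    apply List.ext_getElem
    · simp [PySem.List.length_pyRange_one]
      omega
    · intro j hj1 hj2
      have hj : j < col.toNat := by
        simpa using hj1
      have hcolv : col = (col.toNat : Int) := by omega
      rw [List.getElem_map, List.getElem_map, List.getElem_range,
        PySem.List.getElem_pyRange_one]
      rw [hrow, hcolv]
      simp only [Int.toNat_natCast]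
      ring

-- ===== VERDICT (by name: the statement is the Claim_ definition above) =====
theorem solution_spec : Claim_equal_solution := by
  intro row col _
  exact solution_eq_alt row col
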